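-- pv_equiv track=rewrite | github.com/russpj/weaver | weaver.py | get_best_guess
-- ===== SOURCE A (Python) =====
-- def score_word(guess, target):
--     score = 0
--     size = len(target)
--     for _ in range(size):
--         score *= 10
--         score += 1
--     if size != len(guess):
--         return score
--
--     used_guess_indices = []
--     used_target_indices = []
--     for index, letter in enumerate(guess):
--         if target[index] == letter:
--             score += 2*10**(size-index-1)
--             used_guess_indices.append(index)
--             used_target_indices.append(index)
--     for index, letter in enumerate(guess):
--         if index not in used_guess_indices:
--             for target_index, target_letter in enumerate(target):
--                 if target_index not in used_target_indices:
--                     if letter == target_letter: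
--                         score += 1*10**(size-index-1)
--                         used_guess_indices.append(index)
--                         used_target_indices.append(target_index)
--                         break
--     return score
--
-- def score_word_against_all(guess, word_list):
--     scores = {}
--     largest_bucket_size = 0
--     for key in word_list:
--         score = score_word(guess[0], key[0])
--         if score in scores:
--             scores[score] = scores[score] + 1
--         else:
--             scores[score] = 1
--         largest_bucket_size = max(largest_bucket_size, scores[score])
--     return largest_bucket_size
--
-- def get_best_guess(candidate_words):
--     best_bucket_size = len(candidate_words)
--     best_word = candidate_words[0]
--     for guess in candidate_words[:10]:
--         largest_bucket_size = score_word_against_all(guess, candidate_words)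
--         if largest_bucket_size < best_bucket_size:
--             best_bucket_size = largest_bucket_size
--             best_word = guess
--     return best_word
-- ===== SOURCE B (Python) =====
-- def score_word(guess, target):
--     size = len(target)
--     score = (10 ** size - 1) // 9
--     if len(guess) != size:
--         return score
--     pool = [t for i, t in enumerate(target) if guess[i] != t]
--     for i, g in enumerate(guess):
--         if target[i] == g:
--             score += 2 * 10 ** (size - i - 1)
--         elif g in pool:
--             pool.remove(g)
--             score += 10 ** (size - i - 1)
--     return score
--
-- def score_word_against_all(guess, word_list):
--     scores = [score_word(guess[0], key[0]) for key in word_list]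
--     return max(scores.count(s) for s in scores)
--
-- def get_best_guess(candidate_words):
--     return min(candidate_words[:10],
--                key=lambda guess: score_word_against_all(guess, candidate_words))
-- ===== Notes on version B (the rewrite author's own statement) =====
-- stated objective: simpler
-- what changed: score_word's nested second pass over all target indices with two used-index lists is replaced by a one-pass scan consuming letters from a precomputed pool of non-exact target letters; score_word_against_all buckets via a score list and count instead of a running-max dict; get_best_guess becomes min over the first 10 candidates keyed by bucket size.
import Mathlib
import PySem

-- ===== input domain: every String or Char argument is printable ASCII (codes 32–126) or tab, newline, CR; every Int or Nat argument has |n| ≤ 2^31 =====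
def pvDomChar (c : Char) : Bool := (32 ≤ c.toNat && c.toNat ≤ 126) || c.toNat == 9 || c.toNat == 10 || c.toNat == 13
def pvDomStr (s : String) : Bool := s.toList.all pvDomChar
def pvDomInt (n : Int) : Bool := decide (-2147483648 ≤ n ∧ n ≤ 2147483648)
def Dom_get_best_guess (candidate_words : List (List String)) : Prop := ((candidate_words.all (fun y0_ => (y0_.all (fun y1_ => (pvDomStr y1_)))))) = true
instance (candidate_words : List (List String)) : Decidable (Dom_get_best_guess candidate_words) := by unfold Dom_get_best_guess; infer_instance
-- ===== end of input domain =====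

-- B replaces score_word's nested second pass (two used-index lists, inner scan of the target) by a
-- single pass consuming a precomputed pool of non-exact target letters, buckets by counting a score
-- list, and picks the best guess with min-by-key; objective: simpler.

-- ===== PORT A =====
-- for _ in range(size): score *= 10; score += 1
def pvBaseA (size : Int) : Int :=
  (PySem.List.pyRange 0 size 1).foldl (fun score _ => score * 10 + 1) 0

-- first pass: exact matches
def pvPass1A (target : List Char) (size : Int)
    (st : Int × List Int × List Int) (p : Int × Char) : Int × List Int × List Int :=
  if PySem.List.pyGetD target p.1 '?' == p.2 then
    (st.1 + 2 * 10 ^ (size - p.1 - 1).toNat, st.2.1 ++ [p.1], st.2.2 ++ [p.1])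
  else st

-- inner loop of the second pass: first unused target index holding this letter (break)
def pvFindA (letter : Char) (ut : List Int) : List (Int × Char) → Option Int
  | [] => none
  | q :: rest =>
    if ut.contains q.1 then pvFindA letter ut rest
    else if letter == q.2 then some q.1
    else pvFindA letter ut rest

-- second pass: partial matches
def pvPass2A (target : List Char) (size : Int)
    (st : Int × List Int × List Int) (p : Int × Char) : Int × List Int × List Int :=
  if st.2.1.contains p.1 then st
  else
    match pvFindA p.2 st.2.2 (PySem.List.enumerate target 0) with
    | some j => (st.1 + 1 * 10 ^ (size - p.1 - 1).toNat, st.2.1 ++ [p.1], st.2.2 ++ [j])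
    | none => st

def pvScoreWordA (guess target : String) : Int :=
  let size : Int := target.toList.length
  let score := pvBaseA size
  if size ≠ (guess.toList.length : Int) then score
  else
    let st1 := (PySem.List.enumerate guess.toList 0).foldl (pvPass1A target.toList size) (score, [], [])
    let st2 := (PySem.List.enumerate guess.toList 0).foldl (pvPass2A target.toList size) st1
    st2.1

def pvScoreWordAgainstAllA (guess : List String) (word_list : List (List String)) : Int :=
  (word_list.foldl
    (fun (st : PySem.Dict Int Int × Int) key =>
      let s := pvScoreWordA (PySem.List.pyGetD guess 0 "") (PySem.List.pyGetD key 0 "")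
      let scores := if st.1.contains s then st.1.insert s (st.1.getD s 0 + 1) else st.1.insert s 1
      (scores, max st.2 (scores.getD s 0)))
    (PySem.Dict.empty, 0)).2

def get_best_guess (candidate_words : List (List String)) : List String :=
  ((PySem.List.slice candidate_words none (some 10)).foldl
    (fun (st : Int × List String) guess =>
      let largest := pvScoreWordAgainstAllA guess candidate_words
      if largest < st.1 then (largest, guess) else st)
    ((candidate_words.length : Int), PySem.List.pyGetD candidate_words 0 [])).2

-- ===== PORT B =====
def pvScoreWordB (guess target : String) : Int :=
  let size : Int := target.toList.length
  let score := PySem.Int.floordiv (10 ^ size.toNat - 1) 9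
  if (guess.toList.length : Int) ≠ size then score
  else
    let pool := (PySem.List.enumerate target.toList 0).filterMap
      (fun q => if !(PySem.List.pyGetD guess.toList q.1 '?' == q.2) then some q.2 else none)
    ((PySem.List.enumerate guess.toList 0).foldl
      (fun (st : Int × List Char) p =>
        if PySem.List.pyGetD target.toList p.1 '?' == p.2 then
          (st.1 + 2 * 10 ^ (size - p.1 - 1).toNat, st.2)
        else if st.2.contains p.2 then
          (st.1 + 10 ^ (size - p.1 - 1).toNat, (PySem.List.remove? st.2 p.2).getD st.2)
        else st)
      (score, pool)).1

def pvScoreWordAgainstAllB (guess : List String) (word_list : List (List String)) : Int :=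
  let ss := word_list.map
    (fun key => pvScoreWordB (PySem.List.pyGetD guess 0 "") (PySem.List.pyGetD key 0 ""))
  match PySem.List.max? (ss.map (fun s => (ss.count s : Int))) (fun x => x) with
  | some m => m
  | none => 0

def get_best_guess_alt (candidate_words : List (List String)) : List String :=
  match PySem.List.min? (PySem.List.slice candidate_words none (some 10))
      (fun guess => pvScoreWordAgainstAllB guess candidate_words) with
  | some w => w
  | none => []

-- ===== PRECONDITION & SPEC =====
-- Pre_ excludes exactly the inputs where Python A raises IndexError: an empty candidate list
-- (candidate_words[0]) or any empty word (key[0] / guess[0]).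
def Pre_get_best_guess (candidate_words : List (List String)) : Prop :=
  candidate_words ≠ [] ∧ ∀ w ∈ candidate_words, w ≠ []
instance (candidate_words : List (List String)) : Decidable (Pre_get_best_guess candidate_words) := by
  unfold Pre_get_best_guess; infer_instance
def pvWitness_get_best_guess : List (List String) := [["ab"], ["ba"], ["aa"]]

def Spec_get_best_guess (candidate_words : List (List String)) (out : List String) : Prop := out = get_best_guess_alt candidate_words
instance (candidate_words : List (List String)) (out : List String) : Decidable (Spec_get_best_guess candidate_words out) := by unfold Spec_get_best_guess; infer_instance

-- ===== CLAIM (what is proved, stated in full; the proofs are below) =====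
def Claim_equal_get_best_guess : Prop := ∀ (candidate_words : List (List String)), Dom_get_best_guess candidate_words → Pre_get_best_guess candidate_words → Spec_get_best_guess candidate_words (get_best_guess candidate_words)

-- ===== LEMMAS AND PROOFS =====

-- the pool of target letters at indices not yet used
def pvPool (target : List Char) (ut : List Int) : List Char :=
  (PySem.List.enumerate target 0).filterMap
    (fun q => if ut.contains q.1 then none else some q.2)

def pvPoolOf (L : List (Int × Char)) (ut : List Int) : List Char :=
  L.filterMap (fun q => if ut.contains q.1 then none else some q.2)

def pvEx (target : List Char) (p : Int × Char) : Bool :=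
  PySem.List.pyGetD target p.1 '?' == p.2

def pvExSum (target : List Char) (size : Int) (L : List (Int × Char)) : Int :=
  (L.map (fun p => if pvEx target p then 2 * 10 ^ (size - p.1 - 1).toNat else 0)).sum

def pvExList (target : List Char) (L : List (Int × Char)) : List Int :=
  (L.filter (pvEx target)).map Prod.fst

-- B's per-position step in score_word's main loop
def pvStepB (target : List Char) (size : Int)
    (st : Int × List Char) (p : Int × Char) : Int × List Char :=
  if PySem.List.pyGetD target p.1 '?' == p.2 then
    (st.1 + 2 * 10 ^ (size - p.1 - 1).toNat, st.2)
  else if st.2.contains p.2 then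
    (st.1 + 10 ^ (size - p.1 - 1).toNat, (PySem.List.remove? st.2 p.2).getD st.2)
  else st

lemma pvFoldBase_nine (m : Nat) :
    9 * (List.range m).foldl (fun (s : Int) _ => s * 10 + 1) 0 = 10 ^ m - 1 := by
  induction m with
  | zero => simp
  | succ n ih =>
    have h : (List.range (n+1)).foldl (fun (s : Int) _ => s * 10 + 1) 0
        = (List.range n).foldl (fun (s : Int) _ => s * 10 + 1) 0 * 10 + 1 := by
      rw [List.range_succ, List.foldl_append]; rfl
    rw [h, pow_succ]
    set f := (List.range n).foldl (fun (s : Int) _ => s * 10 + 1) 0 with hf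
    linarith [ih]

lemma pvBaseA_eq (n : Nat) :
    pvBaseA (n : Int) = PySem.Int.floordiv (10 ^ n - 1) 9 := by
  rw [PySem.Int.floordiv_eq_ediv_of_pos (by norm_num : (0:Int) < 9)]
  unfold pvBaseA
  rw [PySem.List.pyRange_zero_nat, List.foldl_map, ← pvFoldBase_nine n,
    Int.mul_ediv_cancel_left _ (by norm_num : (9:Int) ≠ 0)]

lemma pvPoolOf_append_irrel (L : List (Int × Char)) (ut : List Int) (j : Int)
    (h : j ∉ L.map Prod.fst) : pvPoolOf L (ut ++ [j]) = pvPoolOf L ut := by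
  unfold pvPoolOf
  apply List.filterMap_congr
  intro q hq
  have hne : q.1 ≠ j := fun he => h (he ▸ List.mem_map_of_mem hq)
  simp [List.contains_eq_mem, hne]

lemma pvFind_spec : ∀ (L : List (Int × Char)), (L.map Prod.fst).Nodup →
    ∀ (ut : List Int) (c : Char),
    (pvFindA c ut L = none → (pvPoolOf L ut).contains c = false) ∧
    (∀ j, pvFindA c ut L = some j →
      (pvPoolOf L ut).contains c = true ∧ j ∈ L.map Prod.fst ∧
      PySem.List.remove? (pvPoolOf L ut) c = some (pvPoolOf L (ut ++ [j]))) := by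
  intro L
  induction L with
  | nil =>
    intro _ ut c
    exact ⟨fun _ => by simp [pvPoolOf], fun j h => by simp [pvFindA] at h⟩
  | cons q rest ih =>
    intro hnd ut c
    rw [List.map_cons, List.nodup_cons] at hnd
    obtain ⟨hq, hndr⟩ := hnd
    by_cases hk : q.1 ∈ ut
    · have hL : pvPoolOf (q :: rest) ut = pvPoolOf rest ut := by
        simp [pvPoolOf, List.filterMap_cons, hk]
      have hfind : pvFindA c ut (q :: rest) = pvFindA c ut rest := by
        simp [pvFindA, hk]
      refine ⟨fun h => ?_, fun j h => ?_⟩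
      · rw [hL]; exact (ih hndr ut c).1 (hfind ▸ h)
      · obtain ⟨h1, h2, h3⟩ := (ih hndr ut c).2 j (hfind ▸ h)
        refine ⟨hL ▸ h1, List.mem_cons_of_mem _ h2, ?_⟩
        rw [hL, h3]
        congr 1
        simp only [pvPoolOf, List.filterMap_cons]
        have hmem : q.1 ∈ ut ++ [j] := by simp [hk]
        simp [hmem]
    · have hL : pvPoolOf (q :: rest) ut = q.2 :: pvPoolOf rest ut := by
        simp [pvPoolOf, List.filterMap_cons, hk]
      by_cases hc : c = q.2
      · have hfind : pvFindA c ut (q :: rest) = some q.1 := by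
          simp [pvFindA, hk, hc]
        refine ⟨fun h => by rw [hfind] at h; exact absurd h (by simp), fun j h => ?_⟩
        rw [hfind] at h
        injection h with hj
        subst hj
        refine ⟨by simp [hL, hc], by simp, ?_⟩
        rw [hL, hc, PySem.List.remove?_cons_self]
        congr 1
        have h1 : pvPoolOf (q :: rest) (ut ++ [q.1]) = pvPoolOf rest (ut ++ [q.1]) := by
          simp [pvPoolOf, List.filterMap_cons]
        rw [h1, pvPoolOf_append_irrel _ _ _ hq]
      · have hfind : pvFindA c ut (q :: rest) = pvFindA c ut rest := by
          simp [pvFindA, hk, hc]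
        refine ⟨fun h => ?_, fun j h => ?_⟩
        · have := (ih hndr ut c).1 (hfind ▸ h)
          simp [hL, List.contains_eq_mem] at this ⊢
          exact ⟨fun he => hc he, this⟩
        · obtain ⟨h1, h2, h3⟩ := (ih hndr ut c).2 j (hfind ▸ h)
          have hjq : q.1 ≠ j := fun he => hq (he ▸ h2)
          refine ⟨by simp [hL, List.contains_eq_mem] at h1 ⊢; exact Or.inr h1,
                  List.mem_cons_of_mem _ h2, ?_⟩
          have hL' : pvPoolOf (q :: rest) (ut ++ [j]) = q.2 :: pvPoolOf rest (ut ++ [j]) := by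
              simp [pvPoolOf, List.filterMap_cons, hk, hjq]
          rw [hL, hL', PySem.List.remove?_cons_of_ne _ (by first | exact hc | exact Ne.symm hc), h3]
          rfl

lemma pvPass1_spec (target : List Char) (size : Int) :
    ∀ (L : List (Int × Char)) (s0 : Int) (ug ut : List Int),
    L.foldl (pvPass1A target size) (s0, ug, ut) =
      (s0 + pvExSum target size L, ug ++ pvExList target L, ut ++ pvExList target L) := by
  intro L
  induction L with
  | nil => intro s0 ug ut; simp [pvExSum, pvExList]
  | cons p rest ih =>
    intro s0 ug ut
    rw [List.foldl_cons]
    by_cases hp : pvEx target p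
    · have hstep : pvPass1A target size (s0, ug, ut) p
          = (s0 + 2 * 10 ^ (size - p.1 - 1).toNat, ug ++ [p.1], ut ++ [p.1]) := by
        simp [pvPass1A, pvEx] at hp ⊢
        simp [hp]
      rw [hstep, ih]
      simp [pvExSum, pvExList, List.filter_cons, hp, List.append_assoc] <;> ring
    · have hstep : pvPass1A target size (s0, ug, ut) p = (s0, ug, ut) := by
        simp [pvPass1A, pvEx] at hp ⊢
        simp [hp]
      rw [hstep, ih]
      simp [pvExSum, pvExList, List.filter_cons, hp]

lemma pvMain (target : List Char) (size : Int)
    (hT : ((PySem.List.enumerate target 0).map Prod.fst).Nodup) :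
    ∀ (pairs : List (Int × Char)), (pairs.map Prod.fst).Nodup →
    ∀ (ug ut : List Int) (pool : List Char) (sA sB : Int),
    (∀ p ∈ pairs, ug.contains p.1 = pvEx target p) →
    pool = pvPool target ut →
    sA = sB + pvExSum target size pairs →
    (pairs.foldl (pvPass2A target size) (sA, ug, ut)).1 =
      (pairs.foldl (pvStepB target size) (sB, pool)).1 := by
  intro pairs
  induction pairs with
  | nil =>
    intro _ ug ut pool sA sB _ _ hs
    simpa [pvExSum] using hs
  | cons p rest ih =>
    intro hnd ug ut pool sA sB hug hpool hs
    rw [List.map_cons, List.nodup_cons] at hnd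
    obtain ⟨hp1, hndr⟩ := hnd
    rw [List.foldl_cons, List.foldl_cons]
    have hugp := hug p (List.mem_cons_self ..)
    by_cases hex : pvEx target p
    · -- exact position: A skips, B adds the exact bonus
      have hmem : p.1 ∈ ug := by
        rw [hex] at hugp
        simpa [List.contains_eq_mem] using hugp
      have hA : pvPass2A target size (sA, ug, ut) p = (sA, ug, ut) := by
        simp [pvPass2A, hmem]
      have hB : pvStepB target size (sB, pool) p
          = (sB + 2 * 10 ^ (size - p.1 - 1).toNat, pool) := by
        simp [pvStepB, pvEx] at hex ⊢
        simp [hex]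
      rw [hA, hB]
      apply ih hndr _ _ _ _ _ (fun q hq => hug q (List.mem_cons_of_mem _ hq)) hpool
      rw [hs]
      simp [pvExSum, hex]
      ring
    · -- non-exact position
      have hexb : pvEx target p = false := by simpa using hex
      have hcont : p.1 ∉ ug := by
        rw [hexb] at hugp
        simpa [List.contains_eq_mem] using hugp
      have hfs := pvFind_spec (PySem.List.enumerate target 0) hT ut p.2
      cases hfind : pvFindA p.2 ut (PySem.List.enumerate target 0) with
      | none =>
        have hpc : p.2 ∉ pool := by
          have h := hfs.1 hfind
          have hpp : pvPool target ut = pvPoolOf (PySem.List.enumerate target 0) ut := rfl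
          rw [← hpp, ← hpool] at h
          simpa [List.contains_eq_mem] using h
        have hA : pvPass2A target size (sA, ug, ut) p = (sA, ug, ut) := by
          simp [pvPass2A, hcont, hfind]
        have hB : pvStepB target size (sB, pool) p = (sB, pool) := by
          simp [pvStepB, pvEx] at hex ⊢
          simp [hex, hpc]
        rw [hA, hB]
        apply ih hndr _ _ _ _ _ (fun q hq => hug q (List.mem_cons_of_mem _ hq)) hpool
        rw [hs]
        simp [pvExSum, hex]
      | some j =>
        obtain ⟨hpc, hjmem, hrem⟩ := hfs.2 j hfind
        have hpc' : p.2 ∈ pool := by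
          have hpp : pvPool target ut = pvPoolOf (PySem.List.enumerate target 0) ut := rfl
          rw [← hpp, ← hpool] at hpc
          simpa [List.contains_eq_mem] using hpc
        have hA : pvPass2A target size (sA, ug, ut) p
            = (sA + 1 * 10 ^ (size - p.1 - 1).toNat, ug ++ [p.1], ut ++ [j]) := by
          simp [pvPass2A, hcont, hfind]
        have hB : pvStepB target size (sB, pool) p
            = (sB + 10 ^ (size - p.1 - 1).toNat, pvPool target (ut ++ [j])) := by
          simp [pvStepB, pvEx] at hex ⊢
          simp [hex, hpc']
          rw [hpool]
          have := hrem
          unfold pvPool pvPoolOf at *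
          rw [this]
          rfl
        rw [hA, hB]
        apply ih hndr _ _ _ _ _ ?_ rfl ?_
        · intro q hq
          have : (ug ++ [p.1]).contains q.1 = ug.contains q.1 := by
            have hne : q.1 ≠ p.1 := fun he => hp1 (he ▸ List.mem_map_of_mem hq)
            simp [List.contains_eq_mem, hne]
          rw [this]
          exact hug q (List.mem_cons_of_mem _ hq)
        · rw [hs]
          simp [pvExSum, hex]
          ring

lemma pvEnumFst_nodup {α : Type} (xs : List α) :
    ((PySem.List.enumerate xs 0).map Prod.fst).Nodup := by
  rw [PySem.List.map_fst_enumerate]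
  exact PySem.List.nodup_pyRange_one _ _

lemma pvScoreWord_eq (guess target : String) :
    pvScoreWordA guess target = pvScoreWordB guess target := by
  unfold pvScoreWordA pvScoreWordB
  have hbase : pvBaseA (target.toList.length : Int)
      = PySem.Int.floordiv (10 ^ ((target.toList.length : Int)).toNat - 1) 9 := by
    simpa using pvBaseA_eq target.toList.length
  by_cases hlen : (target.toList.length : Int) = (guess.toList.length : Int)
  · simp only [hbase, if_neg (by omega : ¬ (target.toList.length : Int) ≠ (guess.toList.length : Int)),
      if_neg (by omega : ¬ (guess.toList.length : Int) ≠ (target.toList.length : Int))]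
    have hlen' : guess.toList.length = target.toList.length := by exact_mod_cast hlen.symm
    set T := target.toList with hTdef
    set G := guess.toList with hGdef
    set size : Int := (T.length : Int) with hsize
    set base := pvBaseA (T.length : Int) with hbasedef
    -- characterize the used-index list produced by the first pass
    have hpass1 := pvPass1_spec T size (PySem.List.enumerate G 0) base [] []
    have hcontains : ∀ j : Int, j ∈ PySem.List.pyRange 0 (G.length : Int) 1 →
        (pvExList T (PySem.List.enumerate G 0)).contains j
          = pvEx T (j, PySem.List.pyGetD G j '?') := by
      intro j hj
      have hmemG : (j, PySem.List.pyGetD G j '?') ∈ PySem.List.enumerate G 0 := by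
        rw [PySem.List.enumerate_eq_map_pyRange G '?']
        exact List.mem_map_of_mem hj
      cases hEx : pvEx T (j, PySem.List.pyGetD G j '?') with
      | true =>
        simp only [List.contains_eq_mem, decide_eq_true_eq]
        exact List.mem_map.2 ⟨_, List.mem_filter.2 ⟨hmemG, hEx⟩, rfl⟩
      | false =>
        simp only [List.contains_eq_mem, decide_eq_false_iff_not]
        intro hmem
        obtain ⟨q, hq, hq1⟩ := List.mem_map.1 hmem
        have hqe := List.mem_filter.1 hq
        have : q = (j, PySem.List.pyGetD G j '?') :=
          List.inj_on_of_nodup_map (pvEnumFst_nodup G) hqe.1 hmemG hq1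
        rw [this] at hqe
        rw [hqe.2] at hEx
        exact absurd hEx (by simp)
    have hug : ∀ p ∈ PySem.List.enumerate G 0,
        (pvExList T (PySem.List.enumerate G 0)).contains p.1 = pvEx T p := by
      intro p hp
      rw [PySem.List.enumerate_eq_map_pyRange G '?'] at hp
      obtain ⟨j, hj, rfl⟩ := List.mem_map.1 hp
      exact hcontains j hj
    have hpool : (PySem.List.enumerate T 0).filterMap
          (fun q => if !(PySem.List.pyGetD G q.1 '?' == q.2) then some q.2 else none)
        = pvPool T (pvExList T (PySem.List.enumerate G 0)) := by
      unfold pvPool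
      apply List.filterMap_congr
      intro q hq
      rw [PySem.List.enumerate_eq_map_pyRange T '?'] at hq
      obtain ⟨j, hj, rfl⟩ := List.mem_map.1 hq
      have hj' : j ∈ PySem.List.pyRange 0 (G.length : Int) 1 := by
        rw [PySem.List.mem_pyRange_one] at hj ⊢
        simp only [PySem.List.len_eq] at hj
        omega
      have hc := hcontains j hj'
      simp only [pvEx] at hc
      rw [hc]
      by_cases he : PySem.List.pyGetD G j '?' = PySem.List.pyGetD T j '?'
      · simp [he]
      · simp [he, Ne.symm he]
    have hfun : (fun (st : Int × List Char) p =>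
        if PySem.List.pyGetD T p.1 '?' == p.2 then
          (st.1 + 2 * 10 ^ (size - p.1 - 1).toNat, st.2)
        else if st.2.contains p.2 then
          (st.1 + 10 ^ (size - p.1 - 1).toNat, (PySem.List.remove? st.2 p.2).getD st.2)
        else st) = pvStepB T size := rfl
    rw [← hbase, hpool, hfun, hpass1]
    simp only [List.nil_append]
    exact pvMain T size (pvEnumFst_nodup T) (PySem.List.enumerate G 0)
      (pvEnumFst_nodup G)
      (pvExList T (PySem.List.enumerate G 0)) (pvExList T (PySem.List.enumerate G 0))
      (pvPool T (pvExList T (PySem.List.enumerate G 0)))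
      (base + pvExSum T size (PySem.List.enumerate G 0)) base
      hug rfl rfl
  · simp only [hbase, if_pos (by omega : (target.toList.length : Int) ≠ (guess.toList.length : Int)),
      if_pos (by omega : (guess.toList.length : Int) ≠ (target.toList.length : Int))]

-- running max of bucket sizes = size of the largest bucket
def pvMaxCount (xs : List Int) : Int :=
  (xs.map (fun s => (xs.count s : Int))).foldl max 0

lemma pvFoldlMax_le {b : Int} : ∀ (l : List Int) (z : Int), z ≤ b → (∀ x ∈ l, x ≤ b) →
    l.foldl max z ≤ b := by
  intro l
  induction l with
  | nil => intro z hz _; simpa using hz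
  | cons x t ih =>
    intro z hz h
    rw [List.foldl_cons]
    exact ih _ (max_le hz (h x (List.mem_cons_self ..))) fun y hy => h y (List.mem_cons_of_mem _ hy)

lemma pvMaxCount_nonneg (xs : List Int) : 0 ≤ pvMaxCount xs :=
  (PySem.List.le_foldl_max _ _).1

lemma pvMaxCount_append (pre : List Int) (s : Int) :
    pvMaxCount (pre ++ [s]) = max (pvMaxCount pre) (((pre ++ [s]).count s : Int)) := by
  apply le_antisymm
  · apply pvFoldlMax_le _ _ (le_max_of_le_left (pvMaxCount_nonneg pre))
    intro x hx
    obtain ⟨t, ht, rfl⟩ := List.mem_map.1 hx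
    by_cases hts : t = s
    · subst hts; exact le_max_right _ _
    · have hcnt : (pre ++ [s]).count t = pre.count t := by
        have h0 : List.count t [s] = 0 := List.count_eq_zero.2 (by simp [hts])
        simp [List.count_append, h0]
      rw [hcnt]
      have htpre : t ∈ pre := by
        rcases List.mem_append.1 ht with h | h
        · exact h
        · simp at h; exact absurd h hts
      refine le_max_of_le_left ?_
      exact (PySem.List.le_foldl_max _ _).2 _ (List.mem_map_of_mem htpre)
  · apply max_le
    · apply pvFoldlMax_le _ _ (pvMaxCount_nonneg _)
      intro x hx
      obtain ⟨t, ht, rfl⟩ := List.mem_map.1 hx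
      have h1 : (pre.count t : Int) ≤ ((pre ++ [s]).count t : Int) := by
        simp [List.count_append]
      refine h1.trans ?_
      exact (PySem.List.le_foldl_max _ _).2 _
        (List.mem_map_of_mem (List.mem_append_left _ ht))
    · exact (PySem.List.le_foldl_max _ _).2 _
        (List.mem_map_of_mem (List.mem_append_right _ (List.mem_singleton.2 rfl)))

lemma pvSwaaLoop : ∀ (l pre : List Int),
    l.foldl (fun (st : PySem.Dict Int Int × Int) s =>
        (st.1.insert s (st.1.getD s 0 + 1), max st.2 (st.1.getD s 0 + 1)))
      (PySem.Dict.counter pre, pvMaxCount pre)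
    = (PySem.Dict.counter (pre ++ l), pvMaxCount (pre ++ l)) := by
  intro l
  induction l with
  | nil => intro pre; simp
  | cons s t ih =>
    intro pre
    rw [List.foldl_cons]
    have hd : (PySem.Dict.counter pre).insert s ((PySem.Dict.counter pre).getD s 0 + 1)
        = PySem.Dict.counter (pre ++ [s]) := by
      rw [PySem.Dict.counter_append_singleton]
      rfl
    have hcnt : (PySem.Dict.counter pre).getD s 0 + 1 = (((pre ++ [s]).count s : Nat) : Int) := by
      rw [PySem.Dict.getD_counter]
      simp [List.count_append]
    have hm : max (pvMaxCount pre) ((PySem.Dict.counter pre).getD s 0 + 1)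
        = pvMaxCount (pre ++ [s]) := by
      rw [hcnt, pvMaxCount_append]
    rw [hd, hm, ih]
    simp

lemma pvDictStep (d : PySem.Dict Int Int) (s : Int) :
    (if d.contains s then d.insert s (d.getD s 0 + 1) else d.insert s 1)
      = d.insert s (d.getD s 0 + 1) := by
  by_cases h : d.contains s
  · simp [h]
  · have h0 : d.getD s 0 = 0 := by
      have := (PySem.Dict.get?_eq_none_iff_contains d s).2 (by simpa using h)
      simp [PySem.Dict.getD, this]
    simp [h, h0]

lemma pvMaxBucket_eq : ∀ (ss : List Int),
    pvMaxCount ss = (match PySem.List.max? (ss.map (fun s => (ss.count s : Int)))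
      (fun x => x) with | some m => m | none => 0) := by
  intro ss
  cases ss with
  | nil => simp [pvMaxCount, PySem.List.max?]
  | cons s0 t =>
    rw [List.map_cons, PySem.List.max?_id_cons]
    unfold pvMaxCount
    rw [List.map_cons, List.foldl_cons, max_eq_right (by positivity)]

lemma pvMaxBucket_le : ∀ (ss : List Int) (n : Int), (ss.length : Int) ≤ n →
    (match PySem.List.max? (ss.map (fun s => (ss.count s : Int)))
      (fun x => x) with | some m => m | none => 0) ≤ n := by
  intro ss n h
  rw [← pvMaxBucket_eq ss]
  apply pvFoldlMax_le
  · calc (0:Int) ≤ (ss.length : Int) := by positivity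
      _ ≤ n := h
  · intro x hx
    obtain ⟨u, _, rfl⟩ := List.mem_map.1 hx
    calc ((ss.count u : Nat) : Int) ≤ (ss.length : Int) := by exact_mod_cast List.count_le_length
      _ ≤ n := h

lemma pvSwaa_eq (guess : List String) (word_list : List (List String)) :
    pvScoreWordAgainstAllA guess word_list = pvScoreWordAgainstAllB guess word_list := by
  unfold pvScoreWordAgainstAllA pvScoreWordAgainstAllB
  set ss := word_list.map
    (fun key => pvScoreWordB (PySem.List.pyGetD guess 0 "") (PySem.List.pyGetD key 0 "")) with hss
  have hfold : word_list.foldl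
      (fun (st : PySem.Dict Int Int × Int) key =>
        let s := pvScoreWordA (PySem.List.pyGetD guess 0 "") (PySem.List.pyGetD key 0 "")
        let scores := if st.1.contains s then st.1.insert s (st.1.getD s 0 + 1) else st.1.insert s 1
        (scores, max st.2 (scores.getD s 0)))
      (PySem.Dict.empty, 0)
      = ss.foldl (fun (st : PySem.Dict Int Int × Int) s =>
          (st.1.insert s (st.1.getD s 0 + 1), max st.2 (st.1.getD s 0 + 1)))
        (PySem.Dict.empty, 0) := by
    rw [hss, List.foldl_map]
    apply PySem.List.foldl_congr_mem
    intro st key _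
    simp only [pvScoreWord_eq, pvDictStep, PySem.Dict.getD_insert_self]
  rw [hfold]
  have h0 : (PySem.Dict.empty, (0:Int)) = (PySem.Dict.counter ([] : List Int), pvMaxCount []) := rfl
  rw [h0, pvSwaaLoop]
  simp only [List.nil_append]
  exact pvMaxBucket_eq ss

lemma pvSwaa_le (guess : List String) (word_list : List (List String)) :
    pvScoreWordAgainstAllB guess word_list ≤ (word_list.length : Int) := by
  unfold pvScoreWordAgainstAllB
  exact pvMaxBucket_le _ _ (by simp)

lemma pvMinSingle (f : List String → Int) (w : List String) :
    PySem.List.min? [w] f = some w := by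
  simp [PySem.List.min?]

lemma pvMinSplit (f : List String → Int) (w x : List String) (t : List (List String)) :
    PySem.List.min? (w :: x :: t) f
      = if f x < f w then PySem.List.min? (x :: t) f else PySem.List.min? (w :: t) f := by
  simp only [PySem.List.min?, List.foldl_cons]
  by_cases h : f x < f w <;> simp [h]

lemma pvArgmin (f : List String → Int) : ∀ (l : List (List String)) (w : List String),
    (l.foldl (fun (st : Int × List String) g =>
        if f g < st.1 then (f g, g) else st) (f w, w)).2
      = (match PySem.List.min? (w :: l) f with | some x => x | none => []) := by
  intro l
  induction l with
  | nil => intro w; simp [pvMinSingle]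
  | cons x t ih =>
    intro w
    rw [List.foldl_cons, pvMinSplit]
    by_cases h : f x < f w
    · simp only [if_pos h]
      exact ih x
    · simp only [if_neg h]
      exact ih w

lemma pvGbgFold (f : List String → Int) (l : List (List String)) (w0 : List String)
    (b0 : Int) (hle : f w0 ≤ b0) :
    ((w0 :: l).foldl (fun (st : Int × List String) g =>
        if f g < st.1 then (f g, g) else st) (b0, w0)).2
      = (match PySem.List.min? (w0 :: l) f with | some w => w | none => []) := by
  rw [List.foldl_cons]
  have h1 : (if f w0 < b0 then (f w0, w0) else (b0, w0)) = (f w0, w0) := by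
    split_ifs with h
    · rfl
    · have hb : b0 = f w0 := le_antisymm (by omega) hle
      rw [hb]
  rw [h1]
  exact pvArgmin f l w0

-- ===== VERDICT (by name: the statement is the Claim_ definition above) =====
theorem get_best_guess_spec : Claim_equal_get_best_guess := by
  intro candidate_words hdom hpre
  obtain ⟨hne, hwords⟩ := hpre
  unfold Spec_get_best_guess get_best_guess get_best_guess_alt
  cases candidate_words with
  | nil => exact absurd rfl hne
  | cons g0 rest =>
    have hslice : PySem.List.slice (g0 :: rest) none (some 10) = g0 :: rest.take 9 := by
      rw [PySem.List.slice_to _ (by norm_num : (0:Int) ≤ 10)]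
      rfl
    rw [hslice, PySem.List.pyGetD_zero]
    simp only [List.getD_cons_zero]
    have hkey := pvGbgFold (fun g => pvScoreWordAgainstAllB g (g0 :: rest)) (rest.take 9)
      g0 ((g0 :: rest).length : Int) (pvSwaa_le g0 (g0 :: rest))
    rw [← hkey]
    congr 1
    apply PySem.List.foldl_congr_mem
    intro st g _
    simp [pvSwaa_eq]
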